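-- pv_equiv track=rewrite | github.com/novastate/ClickUp-report-app | src/services/home_service.py | _last_activity_label
-- ===== SOURCE A (Python) =====
-- def _last_activity_label(cards: list[dict]) -> str:
--     """Return the freshest 'ago' label across team last_closed entries.
--     Returns 'never' if no team has any closed sprint."""
--     candidates = [c["last_closed"]["ago"] for c in cards if c.get("last_closed")]
--     if not candidates:
--         return "never"
--     def _ord(s: str) -> int:
--         if "just" in s: return 0
--         if s.endswith("m ago"): return 1
--         if s.endswith("h ago"): return 2
--         if "day" in s: return 3
--         return 4
--     return sorted(candidates, key=_ord)[0]
-- ===== SOURCE B (Python) =====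
-- def _last_activity_label(cards: list[dict]) -> str:
--     """Single pass: keep the first label of strictly smallest rank; no list, no sort."""
--     best = None  # (rank, label)
--     for c in cards:
--         lc = c.get("last_closed")
--         if lc:
--             s = lc["ago"]
--             if "just" in s:
--                 r = 0
--             elif s.endswith("m ago"):
--                 r = 1
--             elif s.endswith("h ago"):
--                 r = 2
--             elif "day" in s:
--                 r = 3
--             else:
--                 r = 4
--             if best is None or r < best[0]:
--                 best = (r, s)
--     return "never" if best is None else best[1]
-- ===== Notes on version B (the rewrite author's own statement) =====
-- stated objective: alternative
-- what changed: B replaces build-candidate-list-then-stable-sort-and-take-head by a single pass over the cards that keeps the first label with strictly smallest rank in a (rank,label) accumulator, never materialising the candidate list or a sorted copy.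
import Mathlib
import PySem

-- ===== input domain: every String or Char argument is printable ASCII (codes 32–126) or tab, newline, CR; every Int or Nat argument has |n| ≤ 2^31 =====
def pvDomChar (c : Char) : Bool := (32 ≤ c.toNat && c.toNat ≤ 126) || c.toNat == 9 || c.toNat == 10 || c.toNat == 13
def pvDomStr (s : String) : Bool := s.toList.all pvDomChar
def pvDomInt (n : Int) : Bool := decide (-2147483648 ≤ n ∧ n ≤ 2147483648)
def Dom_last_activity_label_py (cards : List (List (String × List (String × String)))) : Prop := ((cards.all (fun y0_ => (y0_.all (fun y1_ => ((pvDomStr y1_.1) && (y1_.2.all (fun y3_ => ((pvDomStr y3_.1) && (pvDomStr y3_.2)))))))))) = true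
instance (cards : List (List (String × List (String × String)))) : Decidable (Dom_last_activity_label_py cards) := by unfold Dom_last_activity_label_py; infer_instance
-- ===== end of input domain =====

-- B replaces build-candidate-list-then-stable-sort-and-take-head by a single pass
-- over the cards keeping the first label with strictly smallest rank; return values
-- are proved equal on inputs where A does not raise.

-- ===== PORT A =====
-- the inner _ord helper of A
def pvOrd (s : String) : Int :=
  if PySem.Str.isIn "just" s then 0
  else if PySem.Str.endswith s "m ago" then 1
  else if PySem.Str.endswith s "h ago" then 2
  else if PySem.Str.isIn "day" s then 3
  else 4

-- A's candidate comprehension (the .getD "" is only reached where Python raises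
-- KeyError on "ago"; Pre_ excludes those inputs)
def pvCandidates (cards : List (List (String × List (String × String)))) : List String :=
  (cards.filter (fun c =>
      match (PySem.Dict.mk c).get? "last_closed" with
      | some d => !d.isEmpty
      | none => false)).map
    (fun c => ((PySem.Dict.mk (((PySem.Dict.mk c).get? "last_closed").getD [])).get? "ago").getD "")

def last_activity_label_py (cards : List (List (String × List (String × String)))) : String :=
  let candidates := pvCandidates cards
  if candidates.isEmpty then "never"
  else (PySem.List.pyGet? (PySem.List.sorted candidates pvOrd false) 0).getD ""

-- ===== PORT B =====
-- the body of B's single for-loop: update the (rank, label) accumulator from one card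
def pvStep (best : Option (Int × String))
    (c : List (String × List (String × String))) : Option (Int × String) :=
  match (PySem.Dict.mk c).get? "last_closed" with
  | some lc =>
      if lc.isEmpty then best
      else
        let s := ((PySem.Dict.mk lc).get? "ago").getD ""
        let r : Int :=
          if PySem.Str.isIn "just" s then 0
          else if PySem.Str.endswith s "m ago" then 1
          else if PySem.Str.endswith s "h ago" then 2
          else if PySem.Str.isIn "day" s then 3
          else 4
        match best with
        | none => some (r, s)
        | some (br, _) => if r < br then some (r, s) else best
  | none => best

def last_activity_label_py_alt (cards : List (List (String × List (String × String)))) : String :=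
  match cards.foldl pvStep none with
  | none => "never"
  | some (_, s) => s

-- ===== PRECONDITION & SPEC =====
-- Pre_ excludes exactly the inputs where the Pythons raise KeyError: a card whose
-- nonempty "last_closed" dict has no "ago" key (both A and B raise there).
def Pre_last_activity_label_py (cards : List (List (String × List (String × String)))) : Prop :=
  ∀ c ∈ cards,
    ((PySem.Dict.mk c).get? "last_closed").getD [] = [] ∨
    (PySem.Dict.mk (((PySem.Dict.mk c).get? "last_closed").getD [])).contains "ago" = true
instance (cards : List (List (String × List (String × String)))) : Decidable (Pre_last_activity_label_py cards) := by unfold Pre_last_activity_label_py; infer_instance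

def pvWitness_last_activity_label_py : (List (List (String × List (String × String)))) :=
  [[("last_closed", [("ago", "just now")])], [("other", [])], []]

def Spec_last_activity_label_py (cards : List (List (String × List (String × String)))) (out : String) : Prop := out = last_activity_label_py_alt cards
instance (cards : List (List (String × List (String × String)))) (out : String) : Decidable (Spec_last_activity_label_py cards out) := by unfold Spec_last_activity_label_py; infer_instance

-- ===== CLAIM (what is proved, stated in full; the proofs are below) =====
def Claim_equal_last_activity_label_py : Prop := ∀ (cards : List (List (String × List (String × String)))), Dom_last_activity_label_py cards → Pre_last_activity_label_py cards → Spec_last_activity_label_py cards (last_activity_label_py cards)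

-- ===== LEMMAS AND PROOFS =====

-- first element of minimal pvOrd, as a fold
def pvFmin (h : String) (cs : List String) : String :=
  cs.foldl (fun a x => if pvOrd x < pvOrd a then x else a) h

-- B's loop body seen on the candidate list
def pvCStep (best : Option (Int × String)) (s : String) : Option (Int × String) :=
  match best with
  | none => some (pvOrd s, s)
  | some (br, _) => if pvOrd s < br then some (pvOrd s, s) else best

theorem pvStep_eq (best : Option (Int × String))
    (c : List (String × List (String × String))) :
    pvStep best c =
      match (PySem.Dict.mk c).get? "last_closed" with
      | some lc =>
          if lc.isEmpty then best
          else pvCStep best (((PySem.Dict.mk lc).get? "ago").getD "")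
      | none => best := by
  cases h : (PySem.Dict.mk c).get? "last_closed" with
  | none => simp [pvStep, h]
  | some lc =>
      by_cases he : lc.isEmpty
      · simp [pvStep, h, he]
      · cases best with
        | none => simp [pvStep, pvCStep, pvOrd, h, he]
        | some b => cases b; simp [pvStep, pvCStep, pvOrd, h, he]

theorem pvFold_cards_eq (cards : List (List (String × List (String × String))))
    (acc : Option (Int × String)) :
    cards.foldl pvStep acc = (pvCandidates cards).foldl pvCStep acc := by
  induction cards generalizing acc with
  | nil => simp [pvCandidates]
  | cons c cs ih =>
      rw [List.foldl_cons, pvStep_eq]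
      cases h : (PySem.Dict.mk c).get? "last_closed" with
      | none => simp [pvCandidates, List.filter, h, ih, pvCandidates]
      | some lc =>
          by_cases he : lc.isEmpty
          · simp only [he, if_true]
            simp [pvCandidates, List.filter, h, he, ih]
          · simp only [he]
            simp [pvCandidates, List.filter, h, he, ih, pvCandidates]

theorem pvCFold_some (cs : List String) (h : String) :
    cs.foldl pvCStep (some (pvOrd h, h)) = some (pvOrd (pvFmin h cs), pvFmin h cs) := by
  induction cs generalizing h with
  | nil => simp [pvFmin]
  | cons x cs ih =>
      have hstep : pvFmin h (x :: cs) = pvFmin (if pvOrd x < pvOrd h then x else h) cs := by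
        simp [pvFmin, List.foldl]
      rw [List.foldl_cons, hstep]
      by_cases hx : pvOrd x < pvOrd h
      · have : pvCStep (some (pvOrd h, h)) x = some (pvOrd x, x) := by
          simp [pvCStep, hx]
        rw [this, if_pos hx]; exact ih x
      · have : pvCStep (some (pvOrd h, h)) x = some (pvOrd h, h) := by
          simp [pvCStep, hx]
        rw [this, if_neg hx]; exact ih h

theorem pvFoldl_insert_head (cs : List String) (h : String) (t : List String) :
    ∃ t', cs.foldl (fun acc x => PySem.List.insertBy (fun a b => decide (pvOrd a < pvOrd b)) x acc) (h :: t)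
      = pvFmin h cs :: t' := by
  induction cs generalizing h t with
  | nil => exact ⟨t, by simp [pvFmin]⟩
  | cons x cs ih =>
      have hstep : pvFmin h (x :: cs) = pvFmin (if pvOrd x < pvOrd h then x else h) cs := by
        simp [pvFmin, List.foldl]
      rw [List.foldl_cons, hstep]
      by_cases hx : pvOrd x < pvOrd h
      · have : PySem.List.insertBy (fun a b => decide (pvOrd a < pvOrd b)) x (h :: t)
            = x :: h :: t := by simp [PySem.List.insertBy, hx]
        rw [this, if_pos hx]; exact ih x (h :: t)
      · have : PySem.List.insertBy (fun a b => decide (pvOrd a < pvOrd b)) x (h :: t)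
            = h :: PySem.List.insertBy (fun a b => decide (pvOrd a < pvOrd b)) x t := by
          simp [PySem.List.insertBy, hx]
        rw [this, if_neg hx]; exact ih h _

theorem pvSorted_head (cs : List String) (h : String) :
    ∃ t', PySem.List.sorted (h :: cs) pvOrd false = pvFmin h cs :: t' := by
  rw [PySem.List.sorted_eq_foldl_insertBy, List.foldl_cons]
  have : PySem.List.insertBy (fun a b => decide (pvOrd a < pvOrd b)) h ([] : List String) = [h] := by
    simp [PySem.List.insertBy]
  rw [this]
  exact pvFoldl_insert_head cs h []

-- ===== VERDICT (by name: the statement is the Claim_ definition above) =====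
theorem last_activity_label_py_spec : Claim_equal_last_activity_label_py := by
  intro cards _ _
  simp only [Spec_last_activity_label_py, last_activity_label_py, last_activity_label_py_alt]
  rw [pvFold_cards_eq]
  rcases hc : pvCandidates cards with _ | ⟨h, cs⟩
  · simp
  · obtain ⟨t', ht⟩ := pvSorted_head cs h
    have hfold : (h :: cs).foldl pvCStep none
        = some (pvOrd (pvFmin h cs), pvFmin h cs) := by
      rw [List.foldl_cons]
      have : pvCStep none h = some (pvOrd h, h) := by simp [pvCStep]
      rw [this]; exact pvCFold_some cs h
    simp only [List.isEmpty_cons, Bool.false_eq_true, if_false, ht, hfold]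
    simp [PySem.List.pyGet?, PySem.List.pyIdx?]
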